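-- pv_equiv track=rewrite | github.com/abbyluggery/Full-ND-app-build | scripts/extract_recipes_from_pdfs.py | match_pdf_to_meal_name
-- ===== SOURCE A (Python) =====
-- def match_pdf_to_meal_name(pdf_filename, meal_names):
--     """Match PDF filename to Salesforce meal name"""
--     # Remove .pdf extension and clean up
--     clean_name = pdf_filename.replace('.pdf', '').strip()
--
--     # Try exact match first
--     if clean_name in meal_names:
--         return clean_name
--
--     # Try case-insensitive match
--     for meal_name in meal_names:
--         if clean_name.lower() == meal_name.lower():
--             return meal_name
--
--     # Try partial match
--     for meal_name in meal_names:
--         if clean_name.lower() in meal_name.lower() or meal_name.lower() in clean_name.lower():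
--             return meal_name
--
--     return None
-- ===== SOURCE B (Python) =====
-- def match_pdf_to_meal_name(pdf_filename, meal_names):
--     """Match PDF filename to Salesforce meal name (single pass)."""
--     clean_name = pdf_filename.replace('.pdf', '').strip()
--     clean_lower = clean_name.lower()
--     first_ci = None
--     first_partial = None
--     for meal_name in meal_names:
--         if meal_name == clean_name:
--             return clean_name
--         meal_lower = meal_name.lower()
--         if first_ci is None and meal_lower == clean_lower:
--             first_ci = meal_name
--         if first_partial is None and (clean_lower in meal_lower or meal_lower in clean_lower):
--             first_partial = meal_name
--     if first_ci is not None: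
--         return first_ci
--     return first_partial
-- ===== Notes on version B (the rewrite author's own statement) =====
-- stated objective: faster
-- what changed: Replaces A's three priority-ordered scans (exact membership test, case-insensitive loop, partial-match loop) with one single pass that early-returns on an exact match and accumulates the first case-insensitive and first partial candidate, deciding the tier after the loop; clean_name.lower() is computed once instead of once per comparison.
import Mathlib
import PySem

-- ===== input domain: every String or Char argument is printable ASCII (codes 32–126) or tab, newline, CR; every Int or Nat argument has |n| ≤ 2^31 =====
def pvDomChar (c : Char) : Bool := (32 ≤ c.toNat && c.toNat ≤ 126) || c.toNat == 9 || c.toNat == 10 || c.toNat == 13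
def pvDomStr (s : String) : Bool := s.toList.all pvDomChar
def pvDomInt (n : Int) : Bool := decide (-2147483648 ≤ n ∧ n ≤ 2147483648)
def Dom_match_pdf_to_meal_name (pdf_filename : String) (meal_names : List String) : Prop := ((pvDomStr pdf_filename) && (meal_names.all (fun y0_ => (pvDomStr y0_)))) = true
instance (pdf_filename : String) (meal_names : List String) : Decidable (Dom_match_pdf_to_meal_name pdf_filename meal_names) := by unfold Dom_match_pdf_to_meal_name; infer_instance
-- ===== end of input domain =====

-- One honest line: B makes a single pass accumulating the first case-insensitive and first
-- partial candidates (exact match early-returns), instead of A's three priority-ordered scans.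

-- ===== PORT A =====
def match_pdf_to_meal_name (pdf_filename : String) (meal_names : List String) : Option String :=
  let clean_name := PySem.Str.strip (PySem.Str.replace pdf_filename ".pdf" "")
  if meal_names.contains clean_name then some clean_name
  else
    match meal_names.find? (fun meal_name => PySem.Str.lower clean_name == PySem.Str.lower meal_name) with
    | some meal_name => some meal_name
    | none =>
      meal_names.find? (fun meal_name =>
        PySem.Str.isIn (PySem.Str.lower clean_name) (PySem.Str.lower meal_name) ||
        PySem.Str.isIn (PySem.Str.lower meal_name) (PySem.Str.lower clean_name))

-- ===== PORT B =====
def pvAltLoop (clean_name clean_lower : String) :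
    List String → Option String → Option String → Option String
  | [], first_ci, first_partial =>
      match first_ci with
      | some c => some c
      | none => first_partial
  | meal_name :: rest, first_ci, first_partial =>
      if meal_name == clean_name then some clean_name
      else
        let meal_lower := PySem.Str.lower meal_name
        let first_ci' := if first_ci.isNone && (meal_lower == clean_lower) then some meal_name else first_ci
        let first_partial' :=
          if first_partial.isNone &&
             (PySem.Str.isIn clean_lower meal_lower || PySem.Str.isIn meal_lower clean_lower)
          then some meal_name else first_partial
        pvAltLoop clean_name clean_lower rest first_ci' first_partial'

def match_pdf_to_meal_name_alt (pdf_filename : String) (meal_names : List String) : Option String :=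
  let clean_name := PySem.Str.strip (PySem.Str.replace pdf_filename ".pdf" "")
  let clean_lower := PySem.Str.lower clean_name
  pvAltLoop clean_name clean_lower meal_names none none

-- ===== PRECONDITION & SPEC =====
def Spec_match_pdf_to_meal_name (pdf_filename : String) (meal_names : List String) (out : Option String) : Prop := out = match_pdf_to_meal_name_alt pdf_filename meal_names
instance (pdf_filename : String) (meal_names : List String) (out : Option String) : Decidable (Spec_match_pdf_to_meal_name pdf_filename meal_names out) := by unfold Spec_match_pdf_to_meal_name; infer_instance

-- ===== CLAIM (what is proved, stated in full; the proofs are below) =====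
def Claim_equal_match_pdf_to_meal_name : Prop := ∀ (pdf_filename : String) (meal_names : List String), Dom_match_pdf_to_meal_name pdf_filename meal_names → Spec_match_pdf_to_meal_name pdf_filename meal_names (match_pdf_to_meal_name pdf_filename meal_names)

-- ===== LEMMAS AND PROOFS =====

-- Characterisation of B's single pass: exact match wins, else the CI accumulator/scan, else the partial one.
theorem pvAltLoop_eq (clean_name clean_lower : String) (l : List String)
    (ci part : Option String) :
    pvAltLoop clean_name clean_lower l ci part =
      if l.contains clean_name then some clean_name
      else
        (ci.or (l.find? (fun m => PySem.Str.lower m == clean_lower))).or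
          (part.or (l.find? (fun m =>
            PySem.Str.isIn clean_lower (PySem.Str.lower m) ||
            PySem.Str.isIn (PySem.Str.lower m) clean_lower))) := by
  induction l generalizing ci part with
  | nil =>
    simp [pvAltLoop]
    cases ci <;> cases part <;> simp [Option.or]
  | cons m rest ih =>
    by_cases hm : m = clean_name
    · subst hm
      simp [pvAltLoop]
    · have hbeq : (m == clean_name) = false := by simp [hm]
      have hbeq' : (clean_name == m) = false := by simp [Ne.symm hm]
      simp only [pvAltLoop, hbeq, List.contains_cons, hbeq', Bool.false_or,
        List.find?_cons]
      rw [ih]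
      cases hc : (PySem.Str.lower m == clean_lower) <;>
        cases hp : (PySem.Str.isIn clean_lower (PySem.Str.lower m) ||
            PySem.Str.isIn (PySem.Str.lower m) clean_lower) <;>
        cases ci <;> cases part <;>
        simp only [hc, hp, Option.isNone, Bool.and_true,
          Bool.and_false, if_true, if_false, Option.or] <;>
        cases rest.contains clean_name <;> simp

-- ===== VERDICT (by name: the statement is the Claim_ definition above) =====
theorem match_pdf_to_meal_name_spec : Claim_equal_match_pdf_to_meal_name := by
  intro pdf_filename meal_names _
  unfold Spec_match_pdf_to_meal_name match_pdf_to_meal_name match_pdf_to_meal_name_alt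
  rw [pvAltLoop_eq]
  simp only [Option.or]
  split_ifs with h
  · rfl
  · have hsym : ∀ m : String,
        (PySem.Str.lower m == PySem.Str.lower (PySem.Str.strip (PySem.Str.replace pdf_filename ".pdf" ""))) =
        (PySem.Str.lower (PySem.Str.strip (PySem.Str.replace pdf_filename ".pdf" "")) == PySem.Str.lower m) := by
      intro m; exact Bool.beq_comm
    simp only [hsym]
    cases meal_names.find? (fun m => PySem.Str.lower (PySem.Str.strip (PySem.Str.replace pdf_filename ".pdf" "")) == PySem.Str.lower m) <;> rfl
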